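-- pv_equiv track=rewrite | github.com/hazarn01/ED_BOT_V8 | src/pipeline/medical_response_formatter.py | _extract_clinical_approach
-- ===== SOURCE A (Python) =====
-- from typing import Any, Dict, List
--
-- def _extract_clinical_approach(content: str) -> List[str]:
--     """Extract clinical approach information."""
--     approach = []
--
--     approach_keywords = ['approach', 'method', 'strategy', 'management', 'treatment']
--     for keyword in approach_keywords:
--         if keyword.lower() in content.lower():
--             sentences = content.split('.')
--             for sentence in sentences:
--                 if keyword.lower() in sentence.lower():
--                     approach.append(sentence.strip())
--                     break
--
--     return approach[:3]
-- ===== SOURCE B (Python) =====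
-- def _extract_clinical_approach(content: str):
--     """Extract clinical approach information."""
--     keywords = ['approach', 'method', 'strategy', 'management', 'treatment']
--     first_match = {}
--     for sentence in content.split('.'):
--         low = sentence.lower()
--         for kw in keywords:
--             if kw not in first_match and kw in low:
--                 first_match[kw] = sentence.strip()
--     return [first_match[kw] for kw in keywords if kw in first_match][:3]
-- ===== Notes on version B (the rewrite author's own statement) =====
-- stated objective: alternative
-- what changed: A re-splits the content and re-scans all sentences once per keyword (guarded by a whole-content substring test); B splits once and makes a single pass over the sentences building a first-match table keyed by keyword, then emits the recorded sentences in keyword order.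
import Mathlib
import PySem

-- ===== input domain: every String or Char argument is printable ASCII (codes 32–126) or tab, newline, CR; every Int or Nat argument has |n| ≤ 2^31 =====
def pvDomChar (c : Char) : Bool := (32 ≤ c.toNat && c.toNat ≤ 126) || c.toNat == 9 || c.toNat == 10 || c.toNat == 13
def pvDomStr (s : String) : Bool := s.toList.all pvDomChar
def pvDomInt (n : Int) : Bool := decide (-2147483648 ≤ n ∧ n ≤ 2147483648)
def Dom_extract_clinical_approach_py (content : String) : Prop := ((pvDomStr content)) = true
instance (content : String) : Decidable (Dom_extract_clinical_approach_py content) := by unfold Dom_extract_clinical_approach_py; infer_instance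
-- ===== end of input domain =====

-- B builds a first-match table in a single pass over the sentences and emits in keyword order,
-- instead of A's re-splitting and re-scanning the whole content once per keyword (objective: alternative decomposition).

-- ===== PORT A =====
def extract_clinical_approach_py (content : String) : List String :=
  let approach : List String := []
  let approach_keywords : List String := ["approach", "method", "strategy", "management", "treatment"]
  let approach := approach_keywords.foldl (fun approach keyword =>
    if PySem.Str.isIn (PySem.Str.lower keyword) (PySem.Str.lower content) then
      let sentences := (PySem.Str.split? content ".").getD []
      -- 'for sentence in sentences: if kw in sentence.lower(): append; break' = first matching sentence
      match sentences.find? (fun sentence =>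
          PySem.Str.isIn (PySem.Str.lower keyword) (PySem.Str.lower sentence)) with
      | some sentence => approach ++ [PySem.Str.strip sentence]
      | none => approach
    else approach) approach
  PySem.List.slice approach none (some 3)

-- ===== PORT B =====
def extract_clinical_approach_py_alt (content : String) : List String :=
  let keywords : List String := ["approach", "method", "strategy", "management", "treatment"]
  let first_match : PySem.Dict String String :=
    ((PySem.Str.split? content ".").getD []).foldl
      (fun (d : PySem.Dict String String) sentence =>
        let low := PySem.Str.lower sentence
        keywords.foldl (fun d kw =>
          if (d.get? kw).isNone && PySem.Str.isIn kw low then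
            d.insert kw (PySem.Str.strip sentence)
          else d) d)
      PySem.Dict.empty
  PySem.List.slice (keywords.filterMap (fun kw => first_match.get? kw)) none (some 3)

-- ===== PRECONDITION & SPEC =====
def Spec_extract_clinical_approach_py (content : String) (out : List String) : Prop := out = extract_clinical_approach_py_alt content
instance (content : String) (out : List String) : Decidable (Spec_extract_clinical_approach_py content out) := by unfold Spec_extract_clinical_approach_py; infer_instance

-- ===== CLAIM (what is proved, stated in full; the proofs are below) =====
def Claim_equal_extract_clinical_approach_py : Prop := ∀ (content : String), Dom_extract_clinical_approach_py content → Spec_extract_clinical_approach_py content (extract_clinical_approach_py content)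

-- ===== LEMMAS AND PROOFS =====

def mySplit (c : Char) (pre : List Char) : List Char → List (List Char)
  | [] => [pre]
  | x :: r => if x = c then pre :: mySplit c [] r else mySplit c (pre ++ [x]) r

theorem go_eq (c : Char) : ∀ (fuel : Nat) (l cur : List Char) (acc : List (List Char)), l.length < fuel →
    PySem.Chars.splitOn.go [c] fuel l cur acc = acc.reverse ++ mySplit c cur.reverse l := by
  intro fuel
  induction fuel with
  | zero => intro l cur acc h; omega
  | succ n ih =>
    intro l cur acc h
    cases l with
    | nil => simp [PySem.Chars.splitOn.go, mySplit]
    | cons x rest =>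
      simp only [PySem.Chars.splitOn.go, List.isPrefixOf, mySplit]
      by_cases hx : x = c
      · simp [hx, List.isPrefixOf, ih rest [] (cur.reverse :: acc) (by simp at h ⊢; omega), mySplit]
      · have : (c == x) = false := by simp [Ne.symm hx]
        simp [this, List.isPrefixOf, ih rest (x :: cur) acc (by simp at h ⊢; omega), mySplit, hx]

theorem splitOn_eq (c : Char) (s : List Char) :
    PySem.Chars.splitOn s [c] = mySplit c [] s := by
  have := go_eq c (s.length + 1) s [] [] (by omega)
  simpa [PySem.Chars.splitOn] using this

theorem prefix_before (c : Char) : ∀ (kw a b : List Char), c ∉ kw →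
    kw <+: a ++ c :: b → kw <+: a := by
  intro kw
  induction kw with
  | nil => intro a b _ _; exact List.nil_prefix
  | cons k kw' ih =>
    intro a b hc hp
    cases a with
    | nil =>
      simp at hp
      exact absurd (hp.1 ▸ List.mem_cons_self) hc
    | cons y a' =>
      rw [List.cons_append, List.cons_prefix_cons] at hp
      exact hp.1 ▸ List.cons_prefix_cons.mpr ⟨rfl, ih a' b (fun h => hc (List.mem_cons_of_mem _ h)) hp.2⟩

theorem infix_span (c : Char) (kw : List Char) (hc : c ∉ kw) :
    ∀ (a b : List Char), (kw <:+: a ++ c :: b ↔ kw <:+: a ∨ kw <:+: b) := by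
  intro a
  induction a with
  | nil =>
    intro b
    constructor
    · intro h
      rcases List.infix_cons_iff.mp h with h | h
      · left
        have := prefix_before c kw [] b hc h
        simpa [List.prefix_nil.mp this]
      · exact Or.inr h
    · rintro (h | h)
      · simpa [List.infix_nil.mp h] using List.nil_infix
      · exact h.trans ((List.suffix_cons _ _).isInfix)
  | cons x a' ih =>
    intro b
    constructor
    · intro h
      rw [List.cons_append] at h
      rcases List.infix_cons_iff.mp h with h | h
      · exact Or.inl ((prefix_before c kw (x :: a') b hc h).isInfix)
      · rcases (ih b).mp h with h | h
        · exact Or.inl (h.trans ((List.suffix_cons _ _).isInfix))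
        · exact Or.inr h
    · rintro (h | h)
      · exact h.trans ⟨[], c :: b, by simp⟩
      · exact (h.trans ((List.suffix_cons _ _).isInfix)).trans
          (List.IsSuffix.isInfix (List.suffix_append _ _))

theorem infix_lower_split (kw : List Char) (hc : ('.' : Char) ∉ kw) :
    ∀ (l pre : List Char),
      (kw <:+: PySem.Chars.lower pre ++ PySem.Chars.lower l ↔
        ∃ p ∈ mySplit '.' pre l, kw <:+: PySem.Chars.lower p) := by
  intro l
  induction l with
  | nil => intro pre; simp [mySplit, PySem.Chars.lower]
  | cons x r ih =>
    intro pre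
    by_cases hx : x = '.'
    · subst hx
      have hdot : PySem.Chars.lowerChar '.' = '.' := by decide
      have hl : PySem.Chars.lower ('.' :: r) = '.' :: PySem.Chars.lower r := by
        simp [PySem.Chars.lower, hdot]
      have hm : mySplit '.' pre ('.' :: r) = pre :: mySplit '.' [] r := by simp [mySplit]
      have hnil : PySem.Chars.lower ([] : List Char) = [] := rfl
      rw [hl, infix_span '.' kw hc, hm]
      simp only [List.exists_mem_cons_iff]
      have := ih []
      rw [hnil, List.nil_append] at this
      rw [this]
    · have hl : PySem.Chars.lower pre ++ PySem.Chars.lower (x :: r)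
          = PySem.Chars.lower (pre ++ [x]) ++ PySem.Chars.lower r := by
        simp [PySem.Chars.lower]
      have hm : mySplit '.' pre (x :: r) = mySplit '.' (pre ++ [x]) r := by simp [mySplit, hx]
      rw [hl, ih (pre ++ [x]), hm]

def pvSentences (content : String) : List String := (PySem.Str.split? content ".").getD []

theorem pvSentences_eq (content : String) :
    pvSentences content = (mySplit '.' [] content.toList).map String.ofList := by
  simp [pvSentences, PySem.Str.split?, PySem.Chars.split?, splitOn_eq]

theorem guard_eq (content kw : String) (hc : ('.' : Char) ∉ kw.toList) :
    PySem.Str.isIn kw (PySem.Str.lower content) =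
      ((pvSentences content).find? (fun s => PySem.Str.isIn kw (PySem.Str.lower s))).isSome := by
  rw [Bool.eq_iff_iff, List.find?_isSome, PySem.Str.isIn_iff_infix, pvSentences_eq]
  have h := infix_lower_split kw.toList hc content.toList []
  rw [show PySem.Chars.lower ([] : List Char) = [] from rfl, List.nil_append] at h
  rw [PySem.Str.toList_lower]
  rw [h]
  constructor
  · rintro ⟨p, hp, hinf⟩
    exact ⟨String.ofList p, List.mem_map_of_mem hp, by
      rw [PySem.Str.isIn_iff_infix, PySem.Str.toList_lower]; simpa⟩
  · rintro ⟨s, hs, hinf⟩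
    rcases List.mem_map.mp hs with ⟨p, hp, rfl⟩
    rw [PySem.Str.isIn_iff_infix, PySem.Str.toList_lower] at hinf
    exact ⟨p, hp, by simpa using hinf⟩

theorem inner_get (low stripped : String) : ∀ (ks : List String) (d : PySem.Dict String String) (kw : String),
    (ks.foldl (fun d k => if (d.get? k).isNone && PySem.Str.isIn k low then d.insert k stripped else d) d).get? kw
      = if kw ∈ ks ∧ (d.get? kw).isNone ∧ PySem.Str.isIn kw low then some stripped else d.get? kw := by
  intro ks
  induction ks with
  | nil => intro d kw; simp
  | cons k ks ih =>
    intro d kw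
    rw [List.foldl_cons, ih]
    by_cases h1 : ((d.get? k).isNone && PySem.Str.isIn k low) = true
    · rw [if_pos h1]
      by_cases hk : k = kw
      · subst hk
        rw [PySem.Dict.get?_insert_self]
        have h2 := Bool.and_eq_true _ _ ▸ h1
        rw [if_neg (by simp), if_pos ⟨List.mem_cons_self, by simpa using h2.1, h2.2⟩]
      · rw [PySem.Dict.get?_insert_of_ne _ _ (Ne.symm hk)]
        exact if_congr (by simp [List.mem_cons, Ne.symm hk]) rfl rfl
    · rw [if_neg h1]
      by_cases hk : k = kw
      · subst hk
        have hcond : ¬((d.get? k).isNone = true ∧ PySem.Str.isIn k low = true) := by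
          simpa [Bool.and_eq_true] using h1
        rw [if_neg (by tauto), if_neg (by tauto)]
      · exact if_congr (by simp [List.mem_cons, Ne.symm hk]) rfl rfl

theorem found_get (ks : List String) : ∀ (sentences : List String) (d : PySem.Dict String String) (kw : String), kw ∈ ks →
    (sentences.foldl (fun d sentence =>
        ks.foldl (fun d k =>
          if (d.get? k).isNone && PySem.Str.isIn k (PySem.Str.lower sentence) then
            d.insert k (PySem.Str.strip sentence)
          else d) d) d).get? kw
      = (d.get? kw).or ((sentences.find? (fun s => PySem.Str.isIn kw (PySem.Str.lower s))).map PySem.Str.strip) := by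
  intro sentences
  induction sentences with
  | nil => intro d kw _; simp
  | cons s ss ih =>
    intro d kw hkw
    rw [List.foldl_cons, ih _ _ hkw, inner_get]
    rcases hd : d.get? kw with _ | v
    · by_cases hin : PySem.Str.isIn kw (PySem.Str.lower s) = true
      · have hin' : PySem.Chars.isIn kw.toList (PySem.Chars.lower s.toList) = true := by
          simpa using hin
        simp [hkw, hin', List.find?_cons]
      · have hin' : PySem.Chars.isIn kw.toList (PySem.Chars.lower s.toList) = false := by
          simpa using hin
        simp [hin', List.find?_cons]
    · simp [hd]

theorem main_eq (content : String) :
    extract_clinical_approach_py content = extract_clinical_approach_py_alt content := by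
  unfold extract_clinical_approach_py extract_clinical_approach_py_alt
  have hfound : ∀ kw, kw ∈ (["approach", "method", "strategy", "management", "treatment"] : List String) →
      (((PySem.Str.split? content ".").getD []).foldl
        (fun (d : PySem.Dict String String) sentence =>
          (["approach", "method", "strategy", "management", "treatment"] : List String).foldl (fun d kw =>
            if (d.get? kw).isNone && PySem.Str.isIn kw (PySem.Str.lower sentence) then
              d.insert kw (PySem.Str.strip sentence)
            else d) d)
        PySem.Dict.empty).get? kw
      = ((pvSentences content).find? (fun s => PySem.Str.isIn kw (PySem.Str.lower s))).map PySem.Str.strip := by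
    intro kw hkw
    rw [found_get _ _ _ _ hkw]
    simp [pvSentences]
  simp only [List.filterMap_cons, List.filterMap_nil]
  rw [hfound "approach" (by simp), hfound "method" (by simp), hfound "strategy" (by simp),
      hfound "management" (by simp), hfound "treatment" (by simp)]
  simp only [List.foldl_cons, List.foldl_nil, show (PySem.Str.split? content ".").getD [] = pvSentences content from rfl]
  rw [show PySem.Str.lower "approach" = "approach" from by decide,
      show PySem.Str.lower "method" = "method" from by decide,
      show PySem.Str.lower "strategy" = "strategy" from by decide,
      show PySem.Str.lower "management" = "management" from by decide,
      show PySem.Str.lower "treatment" = "treatment" from by decide]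
  rw [guard_eq content "approach" (by decide), guard_eq content "method" (by decide),
      guard_eq content "strategy" (by decide), guard_eq content "management" (by decide),
      guard_eq content "treatment" (by decide)]
  cases h1 : (pvSentences content).find? (fun s => PySem.Str.isIn "approach" (PySem.Str.lower s)) <;>
  cases h2 : (pvSentences content).find? (fun s => PySem.Str.isIn "method" (PySem.Str.lower s)) <;>
  cases h3 : (pvSentences content).find? (fun s => PySem.Str.isIn "strategy" (PySem.Str.lower s)) <;>
  cases h4 : (pvSentences content).find? (fun s => PySem.Str.isIn "management" (PySem.Str.lower s)) <;>
  cases h5 : (pvSentences content).find? (fun s => PySem.Str.isIn "treatment" (PySem.Str.lower s)) <;>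
  simp [h1, h2, h3, h4, h5]

-- ===== VERDICT (by name: the statement is the Claim_ definition above) =====
theorem extract_clinical_approach_py_spec : Claim_equal_extract_clinical_approach_py := by
  intro content _
  unfold Spec_extract_clinical_approach_py
  exact main_eq content
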